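-- pv_equiv track=rewrite | github.com/rclk15/courses | csc242/RecursionExtraCredit_Cheah/ExtracreditRecursion_Cheah.py | noThreeOsStringsAnswer
-- ===== SOURCE A (Python) =====
-- def noThreeOsStringsAnswer(length):
--     '''
--     Iterative approach.
--     Code copied from question specifications.
--     Author: Ivan Temesvari
--     '''
--     if length == 0:
--         return ['']
--     s = [ "0", "1" ]
--     o = []
--     count = 1
--     while count < length:
--         for item in s:
--             p = str(item) + "0"
--             if not "000" in p:
--                 o.append(str(item) + "0")
--             o.append(str(item) + "1")
--         s = o
--         o = []
--         count += 1
--     return set(s)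
-- ===== SOURCE B (Python) =====
-- def noThreeOsStringsAnswer(length):
--     if length == 0:
--         return ['']
--     strings = ['0', '1']
--     for _ in range(length - 1):
--         strings = [s + c for s in strings for c in '01']
--     return {s for s in strings if '000' not in s}
-- ===== Notes on version B (the rewrite author's own statement) =====
-- stated objective: simpler
-- what changed: B replaces A's while-loop that rebuilds the list level by level with pruning inside the inner loop by full enumeration of the binary strings (repeated cartesian extension) followed by a single '000'-filter at the end.
import Mathlib
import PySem

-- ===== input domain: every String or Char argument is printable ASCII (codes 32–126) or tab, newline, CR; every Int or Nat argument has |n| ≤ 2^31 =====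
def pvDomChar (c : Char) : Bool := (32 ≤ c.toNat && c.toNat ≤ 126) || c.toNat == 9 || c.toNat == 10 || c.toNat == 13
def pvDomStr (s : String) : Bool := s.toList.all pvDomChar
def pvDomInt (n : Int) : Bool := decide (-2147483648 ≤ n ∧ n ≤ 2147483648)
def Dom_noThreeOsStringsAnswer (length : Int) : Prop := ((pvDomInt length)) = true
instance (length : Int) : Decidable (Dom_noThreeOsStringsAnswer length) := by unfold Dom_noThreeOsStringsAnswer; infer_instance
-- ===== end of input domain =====

-- B replaces A's level-by-level construction with pruning inside the loop by full enumeration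
-- of the binary strings followed by one '000' filter at the end; objective: simpler (not faster).

-- ===== PORT A =====
-- inner 'for item in s' loop of A's while loop (o starts as [])
def aInner (s : List String) : List String :=
  s.foldl (fun o item =>
    let p := item ++ "0"
    let o := if !(PySem.Str.isIn "000" p) then o ++ [item ++ "0"] else o
    o ++ [item ++ "1"]) []

-- A's 'while count < length' loop; state s, counter count
def aLoop (length : Int) (s : List String) (count : Int) : List String :=
  if count < length then aLoop length (aInner s) (count + 1) else s
termination_by (length - count).toNat
decreasing_by omega

def noThreeOsStringsAnswer (length : Int) : List String :=
  if length = 0 then [""]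
  else PySem.Set.ofList (aLoop length ["0", "1"] 1)

-- ===== PORT B =====
-- for _ in range(length - 1): strings = [s + c for s in strings for c in '01']
-- then {s for s in strings if '000' not in s}
def noThreeOsStringsAnswer_alt (length : Int) : List String :=
  if length = 0 then [""]
  else
    PySem.Set.ofList
      (((PySem.List.pyRange 0 (length - 1) 1).foldl
          (fun strings _ => strings.flatMap (fun s => (["0", "1"] : List String).map (fun c => s ++ c)))
          ["0", "1"]).filter
        (fun s => !(PySem.Str.isIn "000" s)))

-- ===== PRECONDITION & SPEC =====
def Spec_noThreeOsStringsAnswer (length : Int) (out : List String) : Prop := out = noThreeOsStringsAnswer_alt length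
instance (length : Int) (out : List String) : Decidable (Spec_noThreeOsStringsAnswer length out) := by unfold Spec_noThreeOsStringsAnswer; infer_instance

-- ===== CLAIM (what is proved, stated in full; the proofs are below) =====
def Claim_equal_noThreeOsStringsAnswer : Prop := ∀ (length : Int), Dom_noThreeOsStringsAnswer length → Spec_noThreeOsStringsAnswer length (noThreeOsStringsAnswer length)

-- ===== LEMMAS AND PROOFS =====

-- one expansion step of B's loop body
def bStep (l : List String) : List String :=
  l.flatMap (fun s => (["0", "1"] : List String).map (fun c => s ++ c))

-- all binary strings of length n, most-significant character first
def allBin : Nat → List String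
  | 0 => [""]
  | n + 1 => bStep (allBin n)

-- the strings B keeps: all binary strings of length n without '000'
def validStrings (n : Nat) : List String :=
  (allBin n).filter (fun s => !(PySem.Str.isIn "000" s))

-- a '000'-containing string keeps containing '000' after appending anything
theorem isIn_append_of_isIn (s c : String) (h : PySem.Str.isIn "000" s = true) :
    PySem.Str.isIn "000" (s ++ c) = true := by
  rw [PySem.Str.isIn_iff_infix] at h ⊢
  simp only [String.toList_append]
  obtain ⟨u, v, huv⟩ := h
  exact ⟨u, v ++ c.toList, by rw [← huv]; simp⟩

-- a '000'-free string stays '000'-free after appending '1'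
theorem isIn_append_one (s : String) (h : PySem.Str.isIn "000" s = false) :
    PySem.Str.isIn "000" (s ++ "1") = false := by
  by_contra hne
  have htrue : PySem.Str.isIn "000" (s ++ "1") = true := by
    revert hne; cases PySem.Str.isIn "000" (s ++ "1") <;> simp
  rw [PySem.Str.isIn_iff_infix] at htrue
  obtain ⟨u, v, huv⟩ := htrue
  have h000 : ("000" : String).toList = ['0', '0', '0'] := rfl
  rw [h000] at huv
  simp only [String.toList_append] at huv
  have h1 : ("1" : String).toList = ['1'] := rfl
  rw [h1] at huv
  rcases v.eq_nil_or_concat with rfl | ⟨v', c, rfl⟩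
  · have h2 : (u ++ ['0', '0']) ++ ['0'] = s.toList ++ ['1'] := by
      simpa [List.append_assoc] using huv
    exact absurd (List.append_singleton_inj.mp h2).2 (by decide)
  · have h2 : (u ++ ['0', '0', '0'] ++ v') ++ [c] = s.toList ++ ['1'] := by
      simpa [List.append_assoc] using huv
    have h3 := (List.append_singleton_inj.mp h2).1
    have : PySem.Str.isIn "000" s = true := by
      rw [PySem.Str.isIn_iff_infix, h000]
      exact ⟨u, v', h3⟩
    exact absurd this (by simpa using h)

-- A's inner loop written as a flatMap
theorem aInner_eq_flatMap (l : List String) :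
    aInner l = l.flatMap (fun item =>
      (if !(PySem.Str.isIn "000" (item ++ "0")) then [item ++ "0"] else []) ++ [item ++ "1"]) := by
  unfold aInner
  suffices h : ∀ (acc : List String),
      l.foldl (fun o item =>
        let p := item ++ "0"
        let o := if !(PySem.Str.isIn "000" p) then o ++ [item ++ "0"] else o
        o ++ [item ++ "1"]) acc
      = acc ++ l.flatMap (fun item =>
          (if !(PySem.Str.isIn "000" (item ++ "0")) then [item ++ "0"] else []) ++ [item ++ "1"]) by
    simpa using h []
  induction l with
  | nil => intro acc; simp
  | cons x t ih =>
    intro acc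
    simp only [List.foldl_cons, List.flatMap_cons, ih]
    split_ifs <;> simp

-- a flatMap over a list equals the flatMap over its p-filter when g vanishes where p fails
theorem flatMap_restrict {α β : Type} (p : α → Bool) (g : α → List β) :
    ∀ l : List α, (∀ x ∈ l, p x = false → g x = []) → l.flatMap g = (l.filter p).flatMap g := by
  intro l
  induction l with
  | nil => intro _; rfl
  | cons x t ih =>
    intro h
    rw [List.flatMap_cons, List.filter_cons]
    by_cases hx : p x = true
    · rw [if_pos hx, List.flatMap_cons, ih (fun y hy => h y (List.mem_cons_of_mem _ hy))]
    · have hx' : p x = false := by revert hx; cases p x <;> simp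
      rw [if_neg (by simp [hx']), h x (List.mem_cons_self ..) hx', List.nil_append,
        ih (fun y hy => h y (List.mem_cons_of_mem _ hy))]

-- one pass of A's while loop maps level n of the enumeration to level n+1
theorem step_valid (n : Nat) : aInner (validStrings n) = validStrings (n + 1) := by
  have hAB : allBin (n + 1)
      = (allBin n).flatMap (fun s => (["0", "1"] : List String).map (fun c => s ++ c)) := rfl
  rw [aInner_eq_flatMap]
  unfold validStrings
  rw [hAB, List.filter_flatMap,
    flatMap_restrict (fun s => !(PySem.Str.isIn "000" s))
      (fun s => ((["0", "1"] : List String).map (fun c => s ++ c)).filter (fun s => !(PySem.Str.isIn "000" s)))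
      (allBin n)
      (by
        intro x _ hx
        have hx' : PySem.Str.isIn "000" x = true := by simpa using hx
        have h0 := isIn_append_of_isIn x "0" hx'
        have h1 := isIn_append_of_isIn x "1" hx'
        simp only [List.map_cons, List.map_nil, List.filter_cons, List.filter_nil, h0, h1]
        simp)]
  apply List.flatMap_congr
  intro x hx
  have hxok : PySem.Str.isIn "000" x = false := by
    simpa using List.of_mem_filter hx
  have h1 : PySem.Str.isIn "000" (x ++ "1") = false := isIn_append_one x hxok
  simp only [List.map_cons, List.map_nil, List.filter_cons, List.filter_nil, h1]
  split_ifs <;> simp_all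

-- running A's loop from level count gives level length
theorem loop_valid : ∀ (fuel : Nat) (length count : Int), 1 ≤ count → count ≤ length →
    (length - count).toNat = fuel →
    aLoop length (validStrings count.toNat) count = validStrings length.toNat := by
  intro fuel
  induction fuel with
  | zero =>
    intro length count h1 h2 h3
    have hcl : count = length := by omega
    rw [aLoop, if_neg (by omega), hcl]
  | succ k ih =>
    intro length count h1 h2 h3
    rw [aLoop, if_pos (by omega), step_valid]
    have hc : count.toNat + 1 = (count + 1).toNat := by omega
    rw [hc]
    exact ih length (count + 1) (by omega) (by omega) (by omega)

theorem validStrings_one : validStrings 1 = ["0", "1"] := by decide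

-- B's for-loop is k-fold iteration of bStep (the loop variable is unused)
theorem bFold_eq_iterate : ∀ (l : List Int) (init : List String),
    l.foldl (fun strings _ => strings.flatMap (fun s => (["0", "1"] : List String).map (fun c => s ++ c))) init
      = bStep^[l.length] init := by
  intro l
  induction l with
  | nil => intro init; rfl
  | cons x t ih =>
    intro init
    rw [List.foldl_cons, List.length_cons, Function.iterate_succ_apply]
    exact ih (bStep init)

-- iterating bStep k times from the two seeds enumerates level k+1
theorem iterate_bStep (k : Nat) : bStep^[k] ["0", "1"] = allBin (k + 1) := by
  induction k with
  | zero => decide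
  | succ n ih => rw [Function.iterate_succ_apply', ih]; rfl

-- ===== VERDICT (by name: the statement is the Claim_ definition above) =====
theorem noThreeOsStringsAnswer_spec : Claim_equal_noThreeOsStringsAnswer := by
  intro length _
  unfold Spec_noThreeOsStringsAnswer noThreeOsStringsAnswer noThreeOsStringsAnswer_alt
  by_cases h0 : length = 0
  · simp [h0]
  · rw [if_neg h0, if_neg h0, bFold_eq_iterate, PySem.List.length_pyRange_one, iterate_bStep]
    congr 1
    by_cases hneg : length < 0
    · have hz : (length - 1 - 0).toNat = 0 := by omega
      rw [hz, aLoop, if_neg (by omega)]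
      decide
    · have h1 : 1 ≤ length := by omega
      have hk : (length - 1 - 0).toNat + 1 = length.toNat := by omega
      rw [hk]
      calc aLoop length ["0", "1"] 1
          = aLoop length (validStrings (1 : Int).toNat) 1 := by
            rw [show (1 : Int).toNat = 1 from rfl, validStrings_one]
        _ = validStrings length.toNat := loop_valid (length - 1).toNat length 1 le_rfl h1 rfl
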